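-- pv_equiv track=rewrite | github.com/PeakMade/ExecutionPlanRunner | apps/datatrace/scripts/parse_sp.py | _find_matching_end
-- ===== SOURCE A (Python) =====
-- def _find_matching_end(sql: str, start: int) -> int:
--     """Given the position of a CASE keyword, return the index just after its matching END.
--     Handles nested CASE...END blocks by counting depth."""
--     depth = 0
--     i = start
--     upper = sql.upper()
--     while i < len(upper):
--         if upper[i:i+4] == 'CASE' and not upper[i-1:i].isalnum() and not upper[i+4:i+5].isalnum():
--             depth += 1
--             i += 4
--         elif upper[i:i+3] == 'END' and not upper[i-1:i].isalnum() and not upper[i+3:i+4].isalnum():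
--             depth -= 1
--             if depth == 0:
--                 return i + 3
--             i += 3
--         else:
--             i += 1
--     return -1  # unmatched
-- ===== SOURCE B (Python) =====
-- def _find_matching_end(sql: str, start: int) -> int:
--     """Word-segmentation re-implementation: split the uppercased SQL once into
--     its maximal alphanumeric runs (words with their positions), then run the
--     CASE/END depth count over the words at positions >= start.  A maximal
--     alnum run equals 'CASE'/'END' exactly when A's slice + isalnum boundary
--     tests accept that position, so no per-position boundary checks are needed."""
--     upper = sql.upper()
--     words = []
--     run = ''
--     beg = 0
--     for j, c in enumerate(upper):
--         if c.isalnum():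
--             if not run:
--                 beg = j
--             run += c
--         else:
--             if run:
--                 words.append((run, beg))
--                 run = ''
--     if run:
--         words.append((run, beg))
--
--     depth = 0
--     for w, b in words:
--         if b < start:
--             continue
--         if w == 'CASE':
--             depth += 1
--         elif w == 'END':
--             depth -= 1
--             if depth == 0:
--                 return b + 3
--     return -1
-- ===== Notes on version B (the rewrite author's own statement) =====
-- stated objective: alternative
-- what changed: Replaces A's per-position slice scan with boundary isalnum tests and a variable-step cursor by a word-segmentation algorithm: one pass splits the uppercased string into its maximal alphanumeric runs (word, position), then a separate depth fold over the words at positions >= start; no per-position slicing or boundary checks remain.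
-- outside the precondition, e.g. on _find_matching_end('CASE END', -8): A returns -1, B returns 8
import Mathlib
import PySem

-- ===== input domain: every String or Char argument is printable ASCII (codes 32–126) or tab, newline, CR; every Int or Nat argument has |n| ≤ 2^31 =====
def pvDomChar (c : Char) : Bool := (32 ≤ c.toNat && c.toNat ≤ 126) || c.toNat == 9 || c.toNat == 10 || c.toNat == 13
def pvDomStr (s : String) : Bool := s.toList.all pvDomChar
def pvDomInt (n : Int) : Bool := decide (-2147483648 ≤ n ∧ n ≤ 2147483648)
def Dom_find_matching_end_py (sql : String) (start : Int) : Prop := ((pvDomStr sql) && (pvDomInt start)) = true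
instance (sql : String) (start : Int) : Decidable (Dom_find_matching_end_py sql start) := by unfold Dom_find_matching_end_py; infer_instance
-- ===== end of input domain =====

-- B replaces A's per-position slice-and-boundary scan by a word-segmentation
-- algorithm: split the uppercased string once into its maximal alphanumeric
-- runs, then depth-count CASE/END over the words at positions ≥ start
-- (objective: alternative).

-- ===== PORT A =====
-- A's while-loop: state (depth, i); string ops on the char list of sql.upper() (exact).
-- fuel only makes the recursion structural: it starts at (len - start).toNat + 1, one more
-- than the number of remaining positions, so it never runs out before the loop condition fails.
def pvALoop (u : List Char) (fuel : Nat) (depth i : Int) : Int :=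
  match fuel with
  | 0 => -1
  | fuel + 1 =>
    if i < (u.length : Int) then
      if PySem.List.slice u (some i) (some (i + 4)) == ['C', 'A', 'S', 'E']
          && !PySem.Chars.strIsalnum (PySem.List.slice u (some (i - 1)) (some i))
          && !PySem.Chars.strIsalnum (PySem.List.slice u (some (i + 4)) (some (i + 5))) then
        pvALoop u fuel (depth + 1) (i + 4)
      else if PySem.List.slice u (some i) (some (i + 3)) == ['E', 'N', 'D']
          && !PySem.Chars.strIsalnum (PySem.List.slice u (some (i - 1)) (some i))
          && !PySem.Chars.strIsalnum (PySem.List.slice u (some (i + 3)) (some (i + 4))) then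
        let depth' := depth - 1
        if depth' = 0 then i + 3 else pvALoop u fuel depth' (i + 3)
      else
        pvALoop u fuel depth (i + 1)
    else
      -1

def find_matching_end_py (sql : String) (start : Int) : Int :=
  pvALoop (PySem.Str.upper sql).toList
    ((((PySem.Str.upper sql).toList.length : Int) - start).toNat + 1) 0 start

-- ===== PORT B =====
-- B's first for-loop (over enumerate(upper)): state (words, run, beg).
def pvRunLoop : List (Int × Char) → List (List Char × Int) → List Char → Int →
    List (List Char × Int) × List Char × Int
  | [], words, run, beg => (words, run, beg)
  | (j, c) :: rest, words, run, beg =>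
    if PySem.Chars.isalnum c then
      if run.isEmpty then pvRunLoop rest words [c] j
      else pvRunLoop rest words (run ++ [c]) beg
    else
      if run.isEmpty then pvRunLoop rest words run beg
      else pvRunLoop rest (words ++ [(run, beg)]) [] beg

-- the word list: loop over enumerate(upper), then the trailing 'if run:' flush
def pvRuns (u : List Char) : List (List Char × Int) :=
  let st := pvRunLoop (PySem.List.enumerate u 0) [] [] 0
  if st.2.1.isEmpty then st.1 else st.1 ++ [(st.2.1, st.2.2)]

-- B's second for-loop: depth count over the words, skipping positions < start
def pvBFold : List (List Char × Int) → Int → Int → Int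
  | [], _, _ => -1
  | (w, b) :: rest, start, depth =>
    if b < start then pvBFold rest start depth
    else if w == ['C', 'A', 'S', 'E'] then pvBFold rest start (depth + 1)
    else if w == ['E', 'N', 'D'] then
      let d := depth - 1
      if d == 0 then b + 3 else pvBFold rest start d
    else pvBFold rest start depth

def find_matching_end_py_alt (sql : String) (start : Int) : Int :=
  pvBFold (pvRuns (PySem.Str.upper sql).toList) start 0

-- ===== PRECONDITION & SPEC =====
-- Pre_ excludes negative start, which is not a string position (the function's
-- contract: start is the position of a CASE keyword): there A's negative slices
-- wrap around and can rescan the string's tail, an artefact B does not mimic.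
def Pre_find_matching_end_py (sql : String) (start : Int) : Prop := 0 ≤ start
instance (sql : String) (start : Int) : Decidable (Pre_find_matching_end_py sql start) := by
  unfold Pre_find_matching_end_py; infer_instance

def pvWitness_find_matching_end_py : String × Int := ("CASE WHEN x THEN END", 0)

def Spec_find_matching_end_py (sql : String) (start : Int) (out : Int) : Prop :=
  out = find_matching_end_py_alt sql start
instance (sql : String) (start : Int) (out : Int) : Decidable (Spec_find_matching_end_py sql start out) := by
  unfold Spec_find_matching_end_py; infer_instance

-- ===== CLAIM (what is proved, stated in full; the proofs are below) =====
def Claim_equal_find_matching_end_py : Prop :=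
  ∀ (sql : String) (start : Int), Dom_find_matching_end_py sql start →
    Pre_find_matching_end_py sql start →
    Spec_find_matching_end_py sql start (find_matching_end_py sql start)

-- ===== LEMMAS AND PROOFS =====

-- abbreviation for A's CASE/END guard at position i (proof-side only)
def pvWordAt (u : List Char) (p : Int) (w : List Char) : Bool :=
  PySem.List.slice u (some p) (some (p + (w.length : Int))) == w
    && !PySem.Chars.strIsalnum (PySem.List.slice u (some (p - 1)) (some p))
    && !PySem.Chars.strIsalnum (PySem.List.slice u (some (p + (w.length : Int))) (some (p + (w.length : Int) + 1)))

theorem pvWordAt_case (u : List Char) (p : Int) :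
    pvWordAt u p ['C', 'A', 'S', 'E']
      = (PySem.List.slice u (some p) (some (p + 4)) == ['C', 'A', 'S', 'E']
          && !PySem.Chars.strIsalnum (PySem.List.slice u (some (p - 1)) (some p))
          && !PySem.Chars.strIsalnum (PySem.List.slice u (some (p + 4)) (some (p + 5)))) := by
  have h : p + (4 : Int) + 1 = p + 5 := by ring
  simp [pvWordAt]
  norm_num [h]

theorem pvWordAt_end (u : List Char) (p : Int) :
    pvWordAt u p ['E', 'N', 'D']
      = (PySem.List.slice u (some p) (some (p + 3)) == ['E', 'N', 'D']
          && !PySem.Chars.strIsalnum (PySem.List.slice u (some (p - 1)) (some p))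
          && !PySem.Chars.strIsalnum (PySem.List.slice u (some (p + 3)) (some (p + 4)))) := by
  have h : p + (3 : Int) + 1 = p + 4 := by ring
  simp [pvWordAt]
  norm_num [h]

-- pure-specification segmentation of u from index j with an optional open run
def pvSegs (u : List Char) : List Char → Int → Option (List Char × Int) → List (List Char × Int)
  | [], _, none => []
  | [], _, some rb => [rb]
  | c :: t, j, none =>
      if PySem.Chars.isalnum c then pvSegs u t (j + 1) (some ([c], j))
      else pvSegs u t (j + 1) none
  | c :: t, j, some (r, b) =>
      if PySem.Chars.isalnum c then pvSegs u t (j + 1) (some (r ++ [c], b))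
      else (r, b) :: pvSegs u t (j + 1) none

-- the fold in pvRuns computes pvSegs
theorem pvRunLoop_eq_segs (u : List Char) :
    ∀ (v : List Char) (j : Int) (words : List (List Char × Int)) (run : List Char) (beg : Int),
      (let st := pvRunLoop (PySem.List.enumerate v j) words run beg
       if st.2.1.isEmpty then st.1 else st.1 ++ [(st.2.1, st.2.2)])
        = words ++ pvSegs u v j (if run.isEmpty then none else some (run, beg)) := by
  intro v
  induction v with
  | nil =>
    intro j words run beg
    simp only [PySem.List.enumerate_nil, pvRunLoop]
    by_cases h : run.isEmpty <;> simp [h, pvSegs]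
  | cons c t ih =>
    intro j words run beg
    rw [PySem.List.enumerate_cons]
    by_cases ha : PySem.Chars.isalnum c
    · by_cases h : run.isEmpty
      · simp only [pvRunLoop, ha, h, if_true]
        exact (ih (j+1) words [c] j).trans (by simp [pvSegs, ha, h])
      · simp only [pvRunLoop, ha, h, if_true, Bool.false_eq_true, if_false]
        exact (ih (j+1) words (run ++ [c]) beg).trans (by simp [pvSegs, ha, h])
    · by_cases h : run.isEmpty
      · simp only [pvRunLoop, ha, h, if_true, Bool.false_eq_true, if_false]
        exact (ih (j+1) words run beg).trans (by simp [pvSegs, ha, h])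
      · simp only [pvRunLoop, ha, h, Bool.false_eq_true, if_false]
        exact (ih (j+1) (words ++ [(run, beg)]) [] beg).trans (by simp [pvSegs, ha, h])

theorem pvRuns_eq_segs (u : List Char) : pvRuns u = pvSegs u u 0 none := by
  have := pvRunLoop_eq_segs u u 0 [] [] 0
  simpa [pvRuns] using this

-- ---- proof-side helper definitions ----

-- contiguous block of u: u[p : p+m] over natural indices
def pvExtract (u : List Char) (p m : Nat) : List Char := (u.drop p).take m

-- "w is a maximal alphanumeric run of u starting at p"
def pvRunAt (u : List Char) (p : Nat) (w : List Char) : Prop :=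
  w ≠ [] ∧ p + w.length ≤ u.length ∧ w = pvExtract u p w.length ∧
  (∀ c ∈ w, PySem.Chars.isalnum c = true) ∧
  (p = 0 ∨ PySem.Chars.isalnum (u.getD (p - 1) ' ') = false) ∧
  (p + w.length = u.length ∨ PySem.Chars.isalnum (u.getD (p + w.length) ' ') = false)

-- invariant of the open run carried by pvSegs
def pvCarryInv (u : List Char) (jn : Nat) : Option (List Char × Int) → Prop
  | none => jn = 0 ∨ PySem.Chars.isalnum (u.getD (jn - 1) ' ') = false
  | some (r, b) => ∃ bn : Nat, b = (bn : Int) ∧ bn + r.length = jn ∧ r ≠ [] ∧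
      r = pvExtract u bn r.length ∧ (∀ c ∈ r, PySem.Chars.isalnum c = true) ∧
      (bn = 0 ∨ PySem.Chars.isalnum (u.getD (bn - 1) ' ') = false)

-- ---- small facts about pvExtract / drop ----

theorem pvExtract_getD (u : List Char) (p m k : Nat) (hk : k < m) (hin : p + k < u.length) :
    (pvExtract u p m).getD k ' ' = u.getD (p + k) ' ' := by
  simp [pvExtract, List.getD_eq_getElem?_getD, List.getElem?_take, List.getElem?_drop, hk]

theorem pvExtract_one (u : List Char) (q : Nat) (hq : q < u.length) :
    pvExtract u q 1 = [u.getD q ' '] := by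
  have hd := List.drop_eq_getElem_cons hq
  rw [pvExtract, hd]
  rw [List.getD_eq_getElem?_getD, List.getElem?_eq_getElem hq]
  rfl

theorem pvExtract_succ (u : List Char) (p k : Nat) (h : p + k < u.length) :
    pvExtract u p (k + 1) = pvExtract u p k ++ [u.getD (p + k) ' '] := by
  have hk : k < (u.drop p).length := by simp; omega
  rw [pvExtract, List.take_succ, List.getElem?_eq_getElem hk]
  simp [pvExtract, List.getD_eq_getElem?_getD, List.getElem?_drop, List.getElem?_eq_getElem h]

theorem pvExtract_length (u : List Char) (p m : Nat) :
    (pvExtract u p m).length = min m (u.length - p) := by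
  simp [pvExtract]

theorem pv_drop_cons (u : List Char) (jn : Nat) (c : Char) (t : List Char)
    (h : u.drop jn = c :: t) :
    jn < u.length ∧ u.getD jn ' ' = c ∧ u.drop (jn + 1) = t := by
  have h1 : jn < u.length := by
    by_contra hh
    rw [List.drop_eq_nil_of_le (by omega)] at h
    simp at h
  have h0 : u[jn]? = some c := by
    have e : (List.drop jn u)[0]? = u[jn + 0]? := List.getElem?_drop
    rw [h] at e
    simpa using e.symm
  refine ⟨h1, by simp [List.getD_eq_getElem?_getD, h0], ?_⟩
  have e2 : List.drop (jn + 1) u = List.drop 1 (List.drop jn u) := by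
    rw [List.drop_drop, Nat.add_comm]
  rw [e2, h]
  simp

theorem pv_take_push (w : List Char) (k : Nat) (hk : k < w.length) :
    w.take k ++ [w.getD k ' '] = w.take (k + 1) := by
  rw [List.take_succ, List.getElem?_eq_getElem hk]
  rw [List.getD_eq_getElem?_getD, List.getElem?_eq_getElem hk]
  rfl

-- ---- slice bridge: A's slices over natural indices ----

theorem pv_clampIdx_eq (n : Nat) (k : Int) :
    ((PySem.List.clampIdx n k : Nat) : Int)
      = if k < 0 then (if (n : Int) + k < 0 then 0 else (n : Int) + k) else (if k ≤ (n : Int) then k else n) := by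
  simp only [PySem.List.clampIdx]
  split_ifs <;> omega

theorem pv_slice_block (u w : List Char) (i : Int) (m : Nat) (hi : 0 ≤ i)
    (hm : 0 < m) (hw : w.length = m)
    (h : PySem.List.slice u (some i) (some (i + (m : Int))) = w) :
    i.toNat + m ≤ u.length ∧ w = pvExtract u i.toNat m := by
  have hlen := PySem.List.length_slice u i (i + (m : Int))
  rw [h, hw] at hlen
  have e0 := pv_clampIdx_eq u.length i
  have e1 := pv_clampIdx_eq u.length (i + (m : Int))
  have c0 : PySem.List.clampIdx u.length i = i.toNat := by split_ifs at e0 e1 <;> omega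
  have cd : PySem.List.clampIdx u.length (i + (m : Int)) - PySem.List.clampIdx u.length i = m := by
    omega
  refine ⟨by split_ifs at e0 e1 <;> omega, ?_⟩
  rw [← h]
  simp only [PySem.List.slice, pvExtract, c0]
  rw [c0] at cd
  rw [cd]

theorem pv_slice_one (u : List Char) (q : Nat) (hq : q < u.length) :
    PySem.List.slice u (some (q : Int)) (some ((q : Int) + 1)) = [u.getD q ' '] := by
  have h1 : (q : Int) + 1 = ((q : Int) + ((1 : Nat) : Int)) := by push_cast; ring
  rw [h1, PySem.List.slice_natCast_add]
  exact pvExtract_one u q hq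

theorem pv_slice_left_zero (u : List Char) :
    PySem.List.slice u (some (-1 : Int)) (some 0) = [] := by
  simp only [PySem.List.slice]
  simp [PySem.List.clampIdx]

theorem pv_slice_past (u : List Char) (a : Int) (h : (u.length : Int) ≤ a) :
    PySem.List.slice u (some a) (some (a + 1)) = [] := by
  have e1 := pv_clampIdx_eq u.length a
  have e2 := pv_clampIdx_eq u.length (a + 1)
  have c1 : PySem.List.clampIdx u.length a = u.length := by split_ifs at e1 <;> omega
  have c2 : PySem.List.clampIdx u.length (a + 1) = u.length := by split_ifs at e2 <;> omega
  simp only [PySem.List.slice, c1, c2]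
  simp

-- ---- wordAt ↔ pvRunAt ----

theorem pv_wordAt_runAt (u w : List Char) (i : Int) (hi : 0 ≤ i) (hm : 0 < w.length)
    (hal : ∀ c ∈ w, PySem.Chars.isalnum c = true)
    (h : pvWordAt u i w = true) : pvRunAt u i.toNat w := by
  unfold pvWordAt at h
  simp only [Bool.and_eq_true, beq_iff_eq, Bool.not_eq_true'] at h
  obtain ⟨⟨hs, hl⟩, hr⟩ := h
  obtain ⟨hle, hex⟩ := pv_slice_block u w i w.length hi hm rfl hs
  refine ⟨by intro hz; simp [hz] at hm, hle, hex, hal, ?_, ?_⟩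
  · by_cases hz : i.toNat = 0
    · exact Or.inl hz
    · refine Or.inr ?_
      have hq : i.toNat - 1 < u.length := by omega
      have hone := pv_slice_one u (i.toNat - 1) hq
      have e1 : ((i.toNat - 1 : Nat) : Int) = i - 1 := by omega
      rw [e1] at hone
      rw [show i - 1 + 1 = i by ring] at hone
      rw [hone] at hl
      simpa [PySem.Chars.strIsalnum] using hl
  · by_cases hz : i.toNat + w.length = u.length
    · exact Or.inl hz
    · refine Or.inr ?_
      have hq : i.toNat + w.length < u.length := by omega
      have hone := pv_slice_one u (i.toNat + w.length) hq
      have e1 : ((i.toNat + w.length : Nat) : Int) = i + (w.length : Int) := by omega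
      rw [e1] at hone
      rw [hone] at hr
      simpa [PySem.Chars.strIsalnum] using hr

theorem pv_runAt_wordAt (u w : List Char) (pn : Nat)
    (h : pvRunAt u pn w) : pvWordAt u (pn : Int) w = true := by
  obtain ⟨hne, hle, hex, hal, hleft, hright⟩ := h
  unfold pvWordAt
  simp only [Bool.and_eq_true, beq_iff_eq, Bool.not_eq_true']
  refine ⟨⟨?_, ?_⟩, ?_⟩
  · rw [PySem.List.slice_natCast_add]
    exact hex.symm
  · by_cases hz : pn = 0
    · subst hz
      rw [show ((0 : Nat) : Int) - 1 = (-1 : Int) by norm_num]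
      rw [show ((0 : Nat) : Int) = (0 : Int) by norm_num]
      rw [pv_slice_left_zero]
      simp [PySem.Chars.strIsalnum]
    · have hnl := hleft.resolve_left hz
      have hq : pn - 1 < u.length := by
        have : 0 < w.length := List.length_pos_of_ne_nil hne
        omega
      have hone := pv_slice_one u (pn - 1) hq
      have e1 : ((pn - 1 : Nat) : Int) = (pn : Int) - 1 := by omega
      rw [e1] at hone
      rw [show (pn : Int) - 1 + 1 = (pn : Int) by ring] at hone
      rw [hone]
      rw [List.getD_eq_getElem?_getD] at hnl
      simp [PySem.Chars.strIsalnum, hnl]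
  · rcases hright with hz | hnr
    · have hcast : (pn : Int) + (w.length : Int) = (u.length : Int) := by omega
      rw [hcast]
      have := pv_slice_past u (u.length : Int) le_rfl
      rw [this]
      simp [PySem.Chars.strIsalnum]
    · by_cases hz : pn + w.length = u.length
      · have hcast : (pn : Int) + (w.length : Int) = (u.length : Int) := by omega
        rw [hcast, pv_slice_past u (u.length : Int) le_rfl]
        simp [PySem.Chars.strIsalnum]
      · have hq : pn + w.length < u.length := by omega
        have hone := pv_slice_one u (pn + w.length) hq
        have e1 : ((pn + w.length : Nat) : Int) = (pn : Int) + (w.length : Int) := by push_cast; ring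
        rw [e1] at hone
        rw [hone]
        rw [List.getD_eq_getElem?_getD] at hnr
        simp [PySem.Chars.strIsalnum, hnr]

-- ---- characterization of pvSegs ----

theorem pv_segs_bounds (u : List Char) :
    ∀ (v : List Char) (jn : Nat) (ob : Option (List Char × Int)) (lb U : Int),
      (jn : Int) + v.length = U → (∀ rb ∈ ob, lb ≤ rb.2 ∧ rb.2 < U) → lb ≤ (jn : Int) →
      ∀ e ∈ pvSegs u v jn ob, lb ≤ e.2 ∧ e.2 < U := by
  intro v
  induction v with
  | nil =>
    intro jn ob lb U hU hob hlb e he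
    cases ob with
    | none => simp [pvSegs] at he
    | some rb =>
      simp only [pvSegs, List.mem_singleton] at he
      exact he ▸ hob rb rfl
  | cons c t ih =>
    intro jn ob lb U hU hob hlb e he
    have hc : ((jn : Int) + 1) = ((jn + 1 : Nat) : Int) := by push_cast; ring
    have hU' : ((jn + 1 : Nat) : Int) + (t.length : Int) = U := by
      push_cast [List.length_cons] at hU ⊢
      omega
    cases ob with
    | none =>
      by_cases ha : PySem.Chars.isalnum c
      · simp only [pvSegs, ha, if_true, hc] at he
        exact ih (jn + 1) (some ([c], (jn : Int))) lb U hU' (by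
          intro rb hrb
          rw [Option.mem_def] at hrb
          obtain rfl := Option.some.inj hrb
          refine ⟨hlb, ?_⟩
          push_cast [List.length_cons] at hU
          omega) (by push_cast; omega) e he
      · simp only [pvSegs, ha, Bool.false_eq_true, if_false, hc] at he
        exact ih (jn + 1) none lb U hU' (by intro rb hrb; simp at hrb) (by push_cast; omega) e he
    | some rb =>
      obtain ⟨r, b⟩ := rb
      by_cases ha : PySem.Chars.isalnum c
      · simp only [pvSegs, ha, if_true, hc] at he
        exact ih (jn + 1) (some (r ++ [c], b)) lb U hU' (by
          intro rb hrb
          rw [Option.mem_def] at hrb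
          obtain rfl := Option.some.inj hrb
          exact hob (r, b) rfl) (by push_cast; omega) e he
      · simp only [pvSegs, ha, Bool.false_eq_true, if_false, hc, List.mem_cons] at he
        rcases he with rfl | he
        · exact hob (r, b) rfl
        · exact ih (jn + 1) none lb U hU' (by rintro rb ⟨⟩) (by push_cast; omega) e he

theorem pv_segs_sorted (u : List Char) :
    ∀ (v : List Char) (jn : Nat) (ob : Option (List Char × Int)),
      (∀ rb ∈ ob, rb.2 ≤ (jn : Int)) →
      (pvSegs u v jn ob).Pairwise (fun e f => e.2 < f.2) := by
  intro v
  induction v with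
  | nil =>
    intro jn ob hob
    cases ob with
    | none => simp [pvSegs]
    | some rb => simp [pvSegs]
  | cons c t ih =>
    intro jn ob hob
    have hc : ((jn : Int) + 1) = ((jn + 1 : Nat) : Int) := by push_cast; ring
    cases ob with
    | none =>
      by_cases ha : PySem.Chars.isalnum c
      · simp only [pvSegs, ha, if_true, hc]
        exact ih (jn + 1) (some ([c], (jn : Int))) (by
          intro rb hrb
          rw [Option.mem_def] at hrb
          obtain rfl := Option.some.inj hrb
          push_cast
          omega)
      · simp only [pvSegs, ha, Bool.false_eq_true, if_false, hc]
        exact ih (jn + 1) none (by intro rb hrb; simp at hrb)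
    | some rb =>
      obtain ⟨r, b⟩ := rb
      have hb := hob (r, b) rfl
      by_cases ha : PySem.Chars.isalnum c
      · simp only [pvSegs, ha, if_true, hc]
        exact ih (jn + 1) (some (r ++ [c], b)) (by
          intro rb hrb
          rw [Option.mem_def] at hrb
          obtain rfl := Option.some.inj hrb
          simp only []
          omega)
      · simp only [pvSegs, ha, Bool.false_eq_true, if_false, hc]
        refine List.Pairwise.cons ?_ (ih (jn + 1) none (by intro rb hrb; simp at hrb))
        intro f hf
        have hbnd := pv_segs_bounds u t (jn + 1) none ((jn + 1 : Nat) : Int)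
          (((jn + 1 : Nat) : Int) + t.length) rfl (by intro rb hrb; simp at hrb)
          le_rfl f hf
        simp only []
        omega

theorem pv_segs_mem (u : List Char) :
    ∀ (v : List Char) (jn : Nat) (ob : Option (List Char × Int)),
      v = u.drop jn → pvCarryInv u jn ob →
      ∀ w p, (w, p) ∈ pvSegs u v jn ob → ∃ pn : Nat, p = (pn : Int) ∧ pvRunAt u pn w := by
  intro v
  induction v with
  | nil =>
    intro jn ob hv hinv w p he
    cases ob with
    | none => simp [pvSegs] at he
    | some rb =>
      obtain ⟨r, b⟩ := rb
      simp only [pvSegs, List.mem_singleton, Prod.mk.injEq] at he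
      obtain ⟨rfl, rfl⟩ := he
      obtain ⟨bn, rfl, hsum, hne, hext, halr, hleft⟩ := hinv
      have hlen : w.length ≤ u.length - bn := by
        have := pvExtract_length u bn w.length
        rw [← hext] at this
        omega
      have hjn : u.length ≤ jn := by
        have := congrArg List.length hv
        simp at this
        omega
      have hpos : 0 < w.length := List.length_pos_of_ne_nil hne
      exact ⟨bn, rfl, hne, by omega, hext, halr, hleft, Or.inl (by omega)⟩
  | cons c t ih =>
    intro jn ob hv hinv w p he
    obtain ⟨hjn, hcc, ht⟩ := pv_drop_cons u jn c t hv.symm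
    have hcast : ((jn : Int) + 1) = ((jn + 1 : Nat) : Int) := by push_cast; ring
    cases ob with
    | none =>
      by_cases ha : PySem.Chars.isalnum c
      · simp only [pvSegs, ha, if_true, hcast] at he
        refine ih (jn + 1) (some ([c], (jn : Int))) ht.symm ⟨jn, rfl, by simp, by simp, ?_, ?_, hinv⟩ w p he
        · rw [List.length_singleton, pvExtract_one u jn hjn, hcc]
        · intro d hd
          simp at hd
          subst hd
          exact ha
      · simp only [pvSegs, ha, Bool.false_eq_true, if_false, hcast] at he
        refine ih (jn + 1) none ht.symm (Or.inr ?_) w p he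
        simp only [Nat.add_sub_cancel, hcc]
        simpa using ha
    | some rb =>
      obtain ⟨r, b⟩ := rb
      obtain ⟨bn, rfl, hsum, hne, hext, halr, hleft⟩ := hinv
      by_cases ha : PySem.Chars.isalnum c
      · simp only [pvSegs, ha, if_true, hcast] at he
        refine ih (jn + 1) (some (r ++ [c], (bn : Int))) ht.symm
          ⟨bn, rfl, by simp; omega, by simp, ?_, ?_, hleft⟩ w p he
        · rw [List.length_append, List.length_singleton]
          rw [pvExtract_succ u bn r.length (by omega), ← hext]
          congr 1
          rw [show bn + r.length = jn from hsum, hcc]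
        · intro d hd
          simp only [List.mem_append, List.mem_singleton] at hd
          rcases hd with hd | rfl
          · exact halr d hd
          · exact ha
      · simp only [pvSegs, ha, Bool.false_eq_true, if_false, hcast, List.mem_cons,
          Prod.mk.injEq] at he
        rcases he with ⟨rfl, rfl⟩ | he
        · refine ⟨bn, rfl, hne, by omega, hext, halr, hleft, Or.inr ?_⟩
          rw [hsum, hcc]
          simpa using ha
        · refine ih (jn + 1) none ht.symm (Or.inr ?_) w p he
          simp only [Nat.add_sub_cancel, hcc]
          simpa using ha

theorem pv_segs_exist (u w : List Char) (pn : Nat) (hr : pvRunAt u pn w) :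
    ∀ (v : List Char) (jn : Nat) (ob : Option (List Char × Int)),
      v = u.drop jn →
      ((jn ≤ pn ∧ pvCarryInv u jn ob) ∨
        (pn < jn ∧ jn ≤ pn + w.length ∧ ob = some (w.take (jn - pn), (pn : Int)))) →
      (w, (pn : Int)) ∈ pvSegs u v jn ob := by
  obtain ⟨hne, hle, hex, hal, hleft, hright⟩ := hr
  have hm : 0 < w.length := List.length_pos_of_ne_nil hne
  intro v
  induction v with
  | nil =>
    intro jn ob hv hph
    have hjn : u.length ≤ jn := by
      have := congrArg List.length hv
      simp at this
      omega
    rcases hph with ⟨hj, _⟩ | ⟨h1, h2, rfl⟩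
    · omega
    · have hjeq : jn - pn = w.length := by omega
      simp [pvSegs, hjeq]
  | cons c t ih =>
    intro jn ob hv hph
    obtain ⟨hjn, hcc, ht⟩ := pv_drop_cons u jn c t hv.symm
    have hcast : ((jn : Int) + 1) = ((jn + 1 : Nat) : Int) := by push_cast; ring
    rcases hph with ⟨hj, hinv⟩ | ⟨h1, h2, rfl⟩
    · by_cases hjp : jn = pn
      · cases ob with
        | some rb =>
          obtain ⟨r, b⟩ := rb
          obtain ⟨bn, rfl, hsum, hner, hextr, halr, hleftr⟩ := hinv
          exfalso
          have hrpos : 0 < r.length := List.length_pos_of_ne_nil hner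
          have hnl := hleft.resolve_left (by omega : ¬ pn = 0)
          have hk : r.length - 1 < r.length := by omega
          have hgd := pvExtract_getD u bn r.length (r.length - 1) hk (by omega)
          rw [← hextr] at hgd
          have hmem : r.getD (r.length - 1) ' ' ∈ r := by
            rw [List.getD_eq_getElem r ' ' hk]
            exact List.getElem_mem _
          have hald := halr _ hmem
          rw [hgd, show bn + (r.length - 1) = pn - 1 by omega] at hald
          rw [hald] at hnl
          exact absurd hnl (by simp)
        | none =>
          have hgd0 := pvExtract_getD u pn w.length 0 hm (by omega)
          rw [← hex] at hgd0
          have hc0 : c = w.getD 0 ' ' := by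
            rw [hgd0, Nat.add_zero, ← hjp, hcc]
          have hac : PySem.Chars.isalnum c = true := by
            rw [hc0]
            refine hal _ ?_
            rw [List.getD_eq_getElem w ' ' hm]
            exact List.getElem_mem _
          simp only [pvSegs, hac, if_true, hcast]
          have htake : w.take 1 = [w.getD 0 ' '] := by
            cases w with
            | nil => simp at hm
            | cons w0 ws => simp
          have hob : (some ([c], (jn : Int))) = some (w.take (jn + 1 - pn), (pn : Int)) := by
            rw [show jn + 1 - pn = 1 by omega, htake, hc0, hjp]
          rw [hob]
          exact ih (jn + 1) _ ht.symm (Or.inr ⟨by omega, by omega, rfl⟩)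
      · cases ob with
        | none =>
          by_cases ha : PySem.Chars.isalnum c
          · simp only [pvSegs, ha, if_true, hcast]
            refine ih (jn + 1) _ ht.symm (Or.inl ⟨by omega, ⟨jn, rfl, by simp, by simp, ?_, ?_, hinv⟩⟩)
            · rw [List.length_singleton, pvExtract_one u jn hjn, hcc]
            · intro d hd
              simp at hd
              subst hd
              exact ha
          · simp only [pvSegs, ha, Bool.false_eq_true, if_false, hcast]
            refine ih (jn + 1) none ht.symm (Or.inl ⟨by omega, Or.inr ?_⟩)
            simp only [Nat.add_sub_cancel, hcc]
            simpa using ha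
        | some rb =>
          obtain ⟨r, b⟩ := rb
          obtain ⟨bn, rfl, hsum, hner, hextr, halr, hleftr⟩ := hinv
          by_cases ha : PySem.Chars.isalnum c
          · simp only [pvSegs, ha, if_true, hcast]
            refine ih (jn + 1) _ ht.symm (Or.inl ⟨by omega, ⟨bn, rfl, by simp; omega, by simp, ?_, ?_, hleftr⟩⟩)
            · rw [List.length_append, List.length_singleton,
                pvExtract_succ u bn r.length (by omega), ← hextr]
              congr 1
              rw [show bn + r.length = jn from hsum, hcc]
            · intro d hd
              simp only [List.mem_append, List.mem_singleton] at hd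
              rcases hd with hd | rfl
              · exact halr d hd
              · exact ha
          · simp only [pvSegs, ha, Bool.false_eq_true, if_false, hcast]
            refine List.mem_cons_of_mem _ (ih (jn + 1) none ht.symm (Or.inl ⟨by omega, Or.inr ?_⟩))
            simp only [Nat.add_sub_cancel, hcc]
            simpa using ha
    · by_cases hend : jn = pn + w.length
      · have hnr : PySem.Chars.isalnum (u.getD (pn + w.length) ' ') = false :=
          hright.resolve_left (by omega)
        have hac : PySem.Chars.isalnum c = false := by
          rw [← hcc, hend]
          exact hnr
        simp only [pvSegs, hac, Bool.false_eq_true, if_false]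
        rw [show jn - pn = w.length by omega, List.take_length]
        exact List.mem_cons_self
      · have hk : jn - pn < w.length := by omega
        have hgd := pvExtract_getD u pn w.length (jn - pn) hk (by omega)
        rw [← hex] at hgd
        have hc0 : c = w.getD (jn - pn) ' ' := by
          rw [hgd, show pn + (jn - pn) = jn by omega, hcc]
        have hac : PySem.Chars.isalnum c = true := by
          rw [hc0]
          refine hal _ ?_
          rw [List.getD_eq_getElem w ' ' hk]
          exact List.getElem_mem _
        simp only [pvSegs, hac, if_true, hcast]
        have hpush : w.take (jn - pn) ++ [c] = w.take (jn + 1 - pn) := by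
          rw [hc0, show jn + 1 - pn = (jn - pn) + 1 by omega]
          exact pv_take_push w (jn - pn) hk
        rw [hpush]
        exact ih (jn + 1) _ ht.symm (Or.inr ⟨by omega, by omega, rfl⟩)

-- facts about pvRuns u (via pvSegs)
theorem pv_runs_mem (u : List Char) (w : List Char) (p : Int)
    (h : (w, p) ∈ pvRuns u) : ∃ pn : Nat, p = (pn : Int) ∧ pvRunAt u pn w := by
  rw [pvRuns_eq_segs] at h
  exact pv_segs_mem u u 0 none (by simp) (Or.inl rfl) w p h

theorem pv_runs_sorted (u : List Char) : (pvRuns u).Pairwise (fun e f => e.2 < f.2) := by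
  rw [pvRuns_eq_segs]
  exact pv_segs_sorted u u 0 none (by rintro rb ⟨⟩)

theorem pv_runs_ub (u : List Char) : ∀ e ∈ pvRuns u, 0 ≤ e.2 ∧ e.2 < (u.length : Int) := by
  intro e he
  rw [pvRuns_eq_segs] at he
  exact pv_segs_bounds u u 0 none 0 (u.length : Int) (by simp) (by rintro rb ⟨⟩) le_rfl e he

theorem pv_runs_exist (u w : List Char) (pn : Nat) (hr : pvRunAt u pn w) :
    (w, (pn : Int)) ∈ pvRuns u := by
  rw [pvRuns_eq_segs]
  exact pv_segs_exist u w pn hr u 0 none (by simp) (Or.inl ⟨Nat.zero_le _, Or.inl rfl⟩)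

-- word split of a sorted run list around a member
theorem pv_split (l : List (List Char × Int)) (e : List Char × Int) (h : e ∈ l)
    (hp : l.Pairwise (fun a b => a.2 < b.2)) :
    ∃ pre post, l = pre ++ e :: post ∧ (∀ f ∈ pre, f.2 < e.2) ∧ (∀ f ∈ post, e.2 < f.2) := by
  obtain ⟨pre, post, hl⟩ := List.append_of_mem h
  subst hl
  rw [List.pairwise_append] at hp
  obtain ⟨hpre, hpost, hcross⟩ := hp
  exact ⟨pre, post, rfl, fun f hf => hcross f hf e (by simp),
    (List.pairwise_cons.mp hpost).1⟩

-- ---- pvBFold step lemmas ----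

theorem pvBFold_skip (pre l : List (List Char × Int)) (s d : Int)
    (h : ∀ e ∈ pre, e.2 < s) : pvBFold (pre ++ l) s d = pvBFold l s d := by
  induction pre with
  | nil => rfl
  | cons e pre ih =>
    obtain ⟨w, b⟩ := e
    have hb : b < s := h (w, b) (by simp)
    simp only [List.cons_append, pvBFold, if_pos hb]
    exact ih (fun f hf => h f (List.mem_cons_of_mem _ hf))

theorem pvBFold_shift (l : List (List Char × Int)) (s s' d : Int)
    (h : ∀ e ∈ l, s ≤ e.2 ∧ s' ≤ e.2) : pvBFold l s d = pvBFold l s' d := by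
  induction l generalizing d with
  | nil => rfl
  | cons e rest ih =>
    obtain ⟨w, b⟩ := e
    obtain ⟨h1, h2⟩ := h (w, b) (by simp)
    have hrest : ∀ f ∈ rest, s ≤ f.2 ∧ s' ≤ f.2 := fun f hf => h f (List.mem_cons_of_mem _ hf)
    simp only [pvBFold, if_neg (by omega : ¬ b < s), if_neg (by omega : ¬ b < s')]
    split_ifs <;> first | rfl | exact ih _ hrest

theorem pvBFold_neutral (l : List (List Char × Int)) (i d : Int)
    (h : ∀ w, (w, i) ∈ l → w ≠ ['C','A','S','E'] ∧ w ≠ ['E','N','D']) :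
    pvBFold l i d = pvBFold l (i + 1) d := by
  induction l generalizing d with
  | nil => rfl
  | cons e rest ih =>
    obtain ⟨w, b⟩ := e
    have hrest : ∀ w', (w', i) ∈ rest → w' ≠ ['C','A','S','E'] ∧ w' ≠ ['E','N','D'] :=
      fun w' hw => h w' (List.mem_cons_of_mem _ hw)
    rcases lt_trichotomy b i with hb | hb | hb
    · simp only [pvBFold, if_pos hb, if_pos (by omega : b < i + 1)]
      exact ih _ hrest
    · subst hb
      obtain ⟨hc, he⟩ := h w (by simp)
      simp only [pvBFold, if_neg (lt_irrefl b), if_pos (by omega : b < b + 1),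
        beq_eq_false_iff_ne.mpr hc, beq_eq_false_iff_ne.mpr he, Bool.false_eq_true, if_false]
      exact ih _ hrest
    · simp only [pvBFold, if_neg (by omega : ¬ b < i), if_neg (by omega : ¬ b < i + 1)]
      split_ifs <;> first | rfl | exact ih _ hrest

-- ---- the main correspondence ----

-- no run can start strictly inside another run
theorem pv_gap (u w : List Char) (pn : Nat) (hrun : pvRunAt u pn w)
    (f : List Char × Int) (hf : f ∈ pvRuns u) (hgt : (pn : Int) < f.2) :
    (pn : Int) + (w.length : Int) ≤ f.2 := by
  obtain ⟨fw, fb⟩ := f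
  obtain ⟨qn, rfl, hrq⟩ := pv_runs_mem u fw fb hf
  simp only [] at hgt ⊢
  by_contra hlt
  push_neg at hlt
  obtain ⟨hne, hle, hex, hal, hleft, hright⟩ := hrun
  obtain ⟨hneq, hleq, hexq, halq, hleftq, hrightq⟩ := hrq
  have hnl := hleftq.resolve_left (by omega)
  have hk : qn - 1 - pn < w.length := by omega
  have hgd := pvExtract_getD u pn w.length (qn - 1 - pn) hk (by omega)
  rw [← hex] at hgd
  have hmem : w.getD (qn - 1 - pn) ' ' ∈ w := by
    rw [List.getD_eq_getElem w ' ' hk]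
    exact List.getElem_mem _
  have hald := hal _ hmem
  rw [hgd, show pn + (qn - 1 - pn) = qn - 1 by omega] at hald
  rw [hald] at hnl
  exact absurd hnl (by simp)

theorem pv_case_alnum : ∀ c ∈ ['C','A','S','E'], PySem.Chars.isalnum c = true := by
  intro c hc
  fin_cases hc <;> decide

theorem pv_end_alnum : ∀ c ∈ ['E','N','D'], PySem.Chars.isalnum c = true := by
  intro c hc
  fin_cases hc <;> decide

theorem pv_grand (u : List Char) :
    ∀ (fuel : Nat) (depth i : Int), 0 ≤ i → ((u.length : Int) - i).toNat < fuel →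
      pvALoop u fuel depth i = pvBFold (pvRuns u) i depth := by
  intro fuel
  induction fuel with
  | zero =>
    intro depth i hi hk
    exact absurd hk (by omega)
  | succ k ih =>
    intro depth i hi hk
    obtain ⟨pn, rfl⟩ : ∃ pn : Nat, i = (pn : Int) := ⟨i.toNat, by omega⟩
    by_cases hlt : ((pn : Int)) < (u.length : Int)
    · rw [pvALoop, if_pos hlt]
      simp only [← pvWordAt_case, ← pvWordAt_end]
      by_cases hcw : pvWordAt u (pn : Int) ['C','A','S','E'] = true
      · simp only [hcw, if_true]
        have hrun : pvRunAt u pn ['C','A','S','E'] := by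
          have := pv_wordAt_runAt u ['C','A','S','E'] (pn : Int) (by omega) (by norm_num) pv_case_alnum hcw
          simpa using this
        have hmem := pv_runs_exist u _ pn hrun
        obtain ⟨pre, post, heq, hpre, hpost⟩ :=
          pv_split (pvRuns u) (['C','A','S','E'], (pn : Int)) hmem (pv_runs_sorted u)
        have hlen4 : pn + 4 ≤ u.length := by
          have := hrun.2.1
          simpa using this
        have hpost4 : ∀ f ∈ post, (pn : Int) + 4 ≤ f.2 := by
          intro f hf
          have hfr : f ∈ pvRuns u := by
            rw [heq]
            exact List.mem_append_right _ (List.mem_cons_of_mem _ hf)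
          have := pv_gap u _ pn hrun f hfr (hpost f hf)
          simpa using this
        have c1 : pvBFold (pvRuns u) (pn : Int) depth
            = pvBFold ((['C','A','S','E'], (pn : Int)) :: post) (pn : Int) depth := by
          rw [heq]
          exact pvBFold_skip pre _ _ depth (fun f hf => hpre f hf)
        have c2 : pvBFold ((['C','A','S','E'], (pn : Int)) :: post) (pn : Int) depth
            = pvBFold post (pn : Int) (depth + 1) := by
          simp [pvBFold]
        have c3 : pvBFold post (pn : Int) (depth + 1)
            = pvBFold post ((pn : Int) + 4) (depth + 1) :=
          pvBFold_shift post _ _ _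
            (fun f hf => ⟨by have := hpost4 f hf; omega, by have := hpost4 f hf; omega⟩)
        have c4 : pvBFold (pvRuns u) ((pn : Int) + 4) (depth + 1)
            = pvBFold post ((pn : Int) + 4) (depth + 1) := by
          rw [heq, show pre ++ (['C','A','S','E'], (pn : Int)) :: post
              = (pre ++ [(['C','A','S','E'], (pn : Int))]) ++ post by simp]
          refine pvBFold_skip _ _ _ _ ?_
          intro f hf
          simp only [List.mem_append, List.mem_singleton] at hf
          rcases hf with hf | rfl
          · have := hpre f hf
            simp only [] at this
            omega
          · simp only []
            omega
        rw [c1, c2, c3, ← c4]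
        exact ih (depth + 1) ((pn : Int) + 4) (by omega) (by omega)
      · have hcwf : pvWordAt u (pn : Int) ['C','A','S','E'] = false := by simpa using hcw
        by_cases hce : pvWordAt u (pn : Int) ['E','N','D'] = true
        · simp only [hcwf, Bool.false_eq_true, if_false, hce, if_true]
          have hrun : pvRunAt u pn ['E','N','D'] := by
            have := pv_wordAt_runAt u ['E','N','D'] (pn : Int) (by omega) (by norm_num) pv_end_alnum hce
            simpa using this
          have hmem := pv_runs_exist u _ pn hrun
          obtain ⟨pre, post, heq, hpre, hpost⟩ :=
            pv_split (pvRuns u) (['E','N','D'], (pn : Int)) hmem (pv_runs_sorted u)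
          have hlen3 : pn + 3 ≤ u.length := by
            have := hrun.2.1
            simpa using this
          have hpost3 : ∀ f ∈ post, (pn : Int) + 3 ≤ f.2 := by
            intro f hf
            have hfr : f ∈ pvRuns u := by
              rw [heq]
              exact List.mem_append_right _ (List.mem_cons_of_mem _ hf)
            have := pv_gap u _ pn hrun f hfr (hpost f hf)
            simpa using this
          have c1 : pvBFold (pvRuns u) (pn : Int) depth
              = pvBFold ((['E','N','D'], (pn : Int)) :: post) (pn : Int) depth := by
            rw [heq]
            exact pvBFold_skip pre _ _ depth (fun f hf => hpre f hf)
          have c2 : pvBFold ((['E','N','D'], (pn : Int)) :: post) (pn : Int) depth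
              = if depth - 1 = 0 then (pn : Int) + 3 else pvBFold post (pn : Int) (depth - 1) := by
            by_cases hd : depth - 1 = 0 <;> simp [pvBFold, hd]
          rw [c1, c2]
          by_cases hd : depth - 1 = 0
          · rw [if_pos hd, if_pos hd]
          · rw [if_neg hd, if_neg hd]
            have c3 : pvBFold post (pn : Int) (depth - 1)
                = pvBFold post ((pn : Int) + 3) (depth - 1) :=
              pvBFold_shift post _ _ _
                (fun f hf => ⟨by have := hpost3 f hf; omega, by have := hpost3 f hf; omega⟩)
            have c4 : pvBFold (pvRuns u) ((pn : Int) + 3) (depth - 1)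
                = pvBFold post ((pn : Int) + 3) (depth - 1) := by
              rw [heq, show pre ++ (['E','N','D'], (pn : Int)) :: post
                  = (pre ++ [(['E','N','D'], (pn : Int))]) ++ post by simp]
              refine pvBFold_skip _ _ _ _ ?_
              intro f hf
              simp only [List.mem_append, List.mem_singleton] at hf
              rcases hf with hf | rfl
              · have := hpre f hf
                simp only [] at this
                omega
              · simp only []
                omega
            rw [c3, ← c4]
            exact ih (depth - 1) ((pn : Int) + 3) (by omega) (by omega)
        · have hcef : pvWordAt u (pn : Int) ['E','N','D'] = false := by simpa using hce
          simp only [hcwf, hcef, Bool.false_eq_true, if_false]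
          have hneu : pvBFold (pvRuns u) (pn : Int) depth
              = pvBFold (pvRuns u) ((pn : Int) + 1) depth := by
            refine pvBFold_neutral _ _ _ ?_
            intro w hw
            constructor
            · rintro rfl
              obtain ⟨qn, hq, hrq⟩ := pv_runs_mem u _ _ hw
              have hwa := pv_runAt_wordAt u _ qn hrq
              rw [← hq] at hwa
              rw [hwa] at hcwf
              exact absurd hcwf (by simp)
            · rintro rfl
              obtain ⟨qn, hq, hrq⟩ := pv_runs_mem u _ _ hw
              have hwa := pv_runAt_wordAt u _ qn hrq
              rw [← hq] at hwa
              rw [hwa] at hcef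
              exact absurd hcef (by simp)
          rw [hneu]
          exact ih depth ((pn : Int) + 1) (by omega) (by omega)
    · rw [pvALoop, if_neg hlt]
      have h0 := pvBFold_skip (pvRuns u) [] (pn : Int) depth
        (fun e he => by have := (pv_runs_ub u e he).2; omega)
      rw [List.append_nil] at h0
      rw [h0]
      rfl

-- ===== VERDICT (by name: the statement is the Claim_ definition above) =====
theorem find_matching_end_py_spec : Claim_equal_find_matching_end_py := by
  intro sql start _ hpre
  unfold Spec_find_matching_end_py find_matching_end_py find_matching_end_py_alt
  exact pv_grand _ _ 0 start hpre (by omega)
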